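-- pv_equiv track=rewrite | github.com/sazzadhossain881/problem-solving-datastructure-algorithm | AlgoExpert/Array/Easy/move_negative.py | move_negative
-- ===== SOURCE A (Python) =====
-- def move_negative(nums):
--     new_nums = []
--
--     for i in nums:
--         if i < 0:
--             new_nums.append(i)
--
--     for i in nums:
--         if i >= 0:
--             new_nums.append(i)
--
--     return new_nums
-- ===== SOURCE B (Python) =====
-- def move_negative(nums):
--     neg = []
--     nonneg = []
--     for x in nums:
--         if x < 0:
--             neg.append(x)
--         else:
--             nonneg.append(x)
--     return neg + nonneg
-- ===== Notes on version B (the rewrite author's own statement) =====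
-- stated objective: alternative
-- what changed: Single pass partitioning nums into two buckets (neg/nonneg) that are concatenated at the end, instead of A's two separate filtering scans of the input.
import Mathlib
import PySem

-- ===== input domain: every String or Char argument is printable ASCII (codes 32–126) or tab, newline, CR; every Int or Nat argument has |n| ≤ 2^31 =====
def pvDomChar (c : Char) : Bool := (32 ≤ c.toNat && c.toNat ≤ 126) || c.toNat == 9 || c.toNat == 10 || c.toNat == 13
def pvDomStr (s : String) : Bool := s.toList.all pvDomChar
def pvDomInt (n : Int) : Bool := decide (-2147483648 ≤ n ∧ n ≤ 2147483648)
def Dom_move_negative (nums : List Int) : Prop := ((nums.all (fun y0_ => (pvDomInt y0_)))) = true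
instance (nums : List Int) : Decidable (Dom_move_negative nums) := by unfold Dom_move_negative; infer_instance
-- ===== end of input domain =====

-- B replaces A's two scans of nums by one scan filling two buckets then concatenated (same O(n) cost, one pass).

-- ===== PORT A =====
-- two sequential loops over nums, each appending to new_nums
def move_negative (nums : List Int) : List Int :=
  let new_nums : List Int := []
  let new_nums := nums.foldl (fun acc i => if i < 0 then acc ++ [i] else acc) new_nums
  let new_nums := nums.foldl (fun acc i => if i ≥ 0 then acc ++ [i] else acc) new_nums
  new_nums

-- ===== PORT B =====
-- one loop maintaining the pair (neg, nonneg), then neg + nonneg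
def move_negative_alt (nums : List Int) : List Int :=
  let p := nums.foldl (fun (p : List Int × List Int) x =>
    if x < 0 then (p.1 ++ [x], p.2) else (p.1, p.2 ++ [x])) ([], [])
  p.1 ++ p.2

-- ===== PRECONDITION & SPEC =====
def Spec_move_negative (nums : List Int) (out : List Int) : Prop := out = move_negative_alt nums
instance (nums : List Int) (out : List Int) : Decidable (Spec_move_negative nums out) := by unfold Spec_move_negative; infer_instance

-- ===== CLAIM (what is proved, stated in full; the proofs are below) =====
def Claim_equal_move_negative : Prop := ∀ (nums : List Int), Dom_move_negative nums → Spec_move_negative nums (move_negative nums)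

-- ===== LEMMAS AND PROOFS =====

theorem foldA_neg (nums : List Int) (acc : List Int) :
    nums.foldl (fun acc i => if i < 0 then acc ++ [i] else acc) acc
      = acc ++ nums.filter (fun i => decide (i < 0)) := by
  induction nums generalizing acc with
  | nil => simp
  | cons x xs ih =>
    simp only [List.foldl_cons, List.filter_cons]
    by_cases h : x < 0 <;> simp [h, ih]

theorem foldA_nonneg (nums : List Int) (acc : List Int) :
    nums.foldl (fun acc i => if i ≥ 0 then acc ++ [i] else acc) acc
      = acc ++ nums.filter (fun i => decide (i ≥ 0)) := by
  induction nums generalizing acc with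
  | nil => simp
  | cons x xs ih =>
    simp only [List.foldl_cons, List.filter_cons]
    by_cases h : x ≥ 0 <;> simp [h, ih]

theorem foldB (nums : List Int) (p : List Int × List Int) :
    nums.foldl (fun (p : List Int × List Int) x =>
      if x < 0 then (p.1 ++ [x], p.2) else (p.1, p.2 ++ [x])) p
      = (p.1 ++ nums.filter (fun i => decide (i < 0)),
         p.2 ++ nums.filter (fun i => decide (¬ i < 0))) := by
  induction nums generalizing p with
  | nil => simp
  | cons x xs ih =>
    simp only [List.foldl_cons, List.filter_cons]
    by_cases h : x < 0 <;> simp [h, ih]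

-- ===== VERDICT (by name: the statement is the Claim_ definition above) =====
theorem move_negative_spec : Claim_equal_move_negative := by
  intro nums _
  show _ = _
  unfold move_negative move_negative_alt
  simp only [foldA_neg, foldA_nonneg, foldB, List.nil_append]
  congr 1
  apply List.filter_congr
  intro i _
  simp only [decide_eq_decide]
  omega
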